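-- pv_equiv track=rewrite | github.com/lopukhov-eo/xml2pg-ingestion | src/pipeline/batching.py | _estimate_copy_text_row_bytes
-- ===== SOURCE A (Python) =====
-- from typing import Any, Iterable, Iterator, List, Sequence, Tuple
--
-- def _estimate_copy_text_row_bytes(row: Sequence[Any]) -> int:
--     r"""
--     Приблизительная оценка размера строки COPY TEXT (в байтах).
--
--     Нам не нужна идеальная точность — цель контролировать память батча.
--     Оцениваем как сумму длины str(value) (или 2 для '\\N') + табы + '\\n'.
--
--     :param row: Строка значений.
--     :return: Оценка размера в байтах (int).
--     """
--     size = 1  # '\n'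
--     if not row:
--         return size
--
--     # табы между полями: (n-1)
--     size += max(0, len(row) - 1)
--
--     for v in row:
--         if v is None:
--             size += 2  # \N
--         else:
--             # worst-ish: utf-8 может быть > len(str), но это ок для контроля
--             size += len(str(v))
--     return size
-- ===== SOURCE B (Python) =====
-- def _estimate_copy_text_row_bytes(row):
--     payload = "\t".join("\\N" if v is None else str(v) for v in row)
--     return len(payload) + 1
-- ===== Notes on version B (the rewrite author's own statement) =====
-- stated objective: simpler
-- what changed: B builds the actual COPY TEXT payload (fields rendered, tab-joined) and returns its length plus one, replacing A's arithmetic accumulation with a separate tab-count branch and empty-row early return.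
import Mathlib
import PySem

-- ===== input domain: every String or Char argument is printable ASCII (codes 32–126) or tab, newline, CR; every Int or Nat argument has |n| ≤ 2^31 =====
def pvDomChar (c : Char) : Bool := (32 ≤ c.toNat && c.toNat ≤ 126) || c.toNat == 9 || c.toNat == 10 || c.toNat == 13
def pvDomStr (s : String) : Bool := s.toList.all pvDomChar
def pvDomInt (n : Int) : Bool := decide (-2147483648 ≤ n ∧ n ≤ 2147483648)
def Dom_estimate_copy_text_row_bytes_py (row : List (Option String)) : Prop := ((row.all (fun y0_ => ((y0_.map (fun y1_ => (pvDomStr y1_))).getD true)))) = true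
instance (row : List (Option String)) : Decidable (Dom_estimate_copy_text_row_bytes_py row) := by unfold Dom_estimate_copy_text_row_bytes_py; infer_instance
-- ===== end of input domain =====

-- B builds the actual tab-joined COPY TEXT payload and measures it, instead of A's
-- arithmetic accumulation with a separate tab-count term and empty-row early return (objective: simpler).

-- ===== PORT A =====
def estimate_copy_text_row_bytes_py (row : List (Option String)) : Int :=
  let size : Int := 1
  if row.isEmpty then size
  else
    let size := size + max 0 ((row.length : Int) - 1)
    row.foldl (fun s v =>
      match v with
      | none => s + 2
      | some str => s + PySem.Str.len str) size

-- ===== PORT B =====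
def estimate_copy_text_row_bytes_py_alt (row : List (Option String)) : Int :=
  let payload := PySem.Str.join "\t" (row.map (fun v =>
    match v with
    | none => "\\N"
    | some s => s))
  PySem.Str.len payload + 1

-- ===== PRECONDITION & SPEC =====
def Spec_estimate_copy_text_row_bytes_py (row : List (Option String)) (out : Int) : Prop := out = estimate_copy_text_row_bytes_py_alt row
instance (row : List (Option String)) (out : Int) : Decidable (Spec_estimate_copy_text_row_bytes_py row out) := by unfold Spec_estimate_copy_text_row_bytes_py; infer_instance

-- ===== CLAIM (what is proved, stated in full; the proofs are below) =====
def Claim_equal_estimate_copy_text_row_bytes_py : Prop := ∀ (row : List (Option String)), Dom_estimate_copy_text_row_bytes_py row → Spec_estimate_copy_text_row_bytes_py row (estimate_copy_text_row_bytes_py row)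

-- ===== LEMMAS AND PROOFS =====

-- the character-list form of one rendered field
def pvField (v : Option String) : List Char :=
  match v with
  | none => ['\\', 'N']
  | some s => s.toList

theorem pvField_toList (v : Option String) :
    (match v with | none => "\\N" | some s => s).toList = pvField v := by
  cases v <;> rfl

-- A's fold equals its start plus the per-field weights
theorem foldA_eq (l : List (Option String)) (s : Int) :
    l.foldl (fun s v =>
      match v with
      | none => s + 2
      | some str => s + PySem.Str.len str) s
    = s + (l.map (fun v => ((pvField v).length : Int))).sum := by
  induction l generalizing s with
  | nil => simp
  | cons x t ih =>
    simp only [List.foldl_cons, ih, List.map_cons, List.sum_cons]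
    cases x <;> simp [pvField, PySem.Str.len_eq] <;> ring

-- length of the tab-joined nonempty payload
theorem join_len (x : Option String) (l : List (Option String)) :
    ((PySem.Chars.join ['\t'] ((x :: l).map (fun v => pvField v))).length : Int)
    = (pvField x).length + (l.map (fun v => (1 + (pvField v).length : Int))).sum := by
  induction l generalizing x with
  | nil => simp [PySem.Chars.join_singleton]
  | cons y t ih =>
    have h := ih y
    simp only [List.map_cons] at h ⊢
    rw [PySem.Chars.join_cons_cons]
    simp only [List.length_append, List.sum_cons]
    push_cast
    rw [h]
    simp
    ring

theorem sum_one_add (l : List (Option String)) :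
    (l.map (fun v => (1 + (pvField v).length : Int))).sum
    = l.length + (l.map (fun v => ((pvField v).length : Int))).sum := by
  induction l with
  | nil => simp
  | cons x t ih => simp [ih]; ring

-- ===== VERDICT (by name: the statement is the Claim_ definition above) =====
theorem estimate_copy_text_row_bytes_py_spec : Claim_equal_estimate_copy_text_row_bytes_py := by
  intro row _
  unfold Spec_estimate_copy_text_row_bytes_py
  unfold estimate_copy_text_row_bytes_py estimate_copy_text_row_bytes_py_alt
  cases row with
  | nil => simp [PySem.Str.len_eq, PySem.Str.toList_join, PySem.Chars.join_nil]
  | cons x t =>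
    simp only [List.isEmpty_cons, if_neg Bool.false_ne_true]
    rw [foldA_eq]
    simp only [PySem.Str.len_eq, PySem.Str.toList_join,
      show ("\t").toList = ['\t'] from rfl]
    have hmap : (List.map (fun v => match v with | none => "\\N" | some s => s) (x :: t)).map
        String.toList = (x :: t).map (fun v => pvField v) := by
      rw [List.map_map]
      exact List.map_congr_left (fun v _ => pvField_toList v)
    rw [hmap, join_len, sum_one_add]
    simp [List.length_cons]
    ring
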